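-- pv_equiv track=rewrite | github.com/archanakumar015/Digital-Mental-Health-and-Psychological-Support-System | backend/quiz_service.py | _determine_overall_severity
-- ===== SOURCE A (Python) =====
-- from typing import Dict, List, Optional, Tuple
--
-- def _determine_overall_severity(final_scores: Dict) -> str:
--     """Determine overall severity across all concerns"""
--     if not final_scores:
--         return 'mild'
--
--     severity_levels = [score_data['severity'] for score_data in final_scores.values()]
--
--     if 'severe' in severity_levels:
--         return 'severe'
--     elif 'moderate' in severity_levels:
--         return 'moderate'
--     else:
--         return 'mild'
-- ===== SOURCE B (Python) =====
-- def _determine_overall_severity(final_scores):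
--     """Determine overall severity across all concerns"""
--     if not final_scores:
--         return 'mild'
--     rank = 0
--     for score_data in final_scores.values():
--         severity = score_data['severity']
--         r = 2 if severity == 'severe' else (1 if severity == 'moderate' else 0)
--         if r > rank:
--             rank = r
--     return ('mild', 'moderate', 'severe')[rank]
-- ===== Notes on version B (the rewrite author's own statement) =====
-- stated objective: alternative
-- what changed: Replaces the intermediate severity list plus two membership scans with a single pass keeping a running maximum severity rank, decoded to a label at the end.
import Mathlib
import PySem

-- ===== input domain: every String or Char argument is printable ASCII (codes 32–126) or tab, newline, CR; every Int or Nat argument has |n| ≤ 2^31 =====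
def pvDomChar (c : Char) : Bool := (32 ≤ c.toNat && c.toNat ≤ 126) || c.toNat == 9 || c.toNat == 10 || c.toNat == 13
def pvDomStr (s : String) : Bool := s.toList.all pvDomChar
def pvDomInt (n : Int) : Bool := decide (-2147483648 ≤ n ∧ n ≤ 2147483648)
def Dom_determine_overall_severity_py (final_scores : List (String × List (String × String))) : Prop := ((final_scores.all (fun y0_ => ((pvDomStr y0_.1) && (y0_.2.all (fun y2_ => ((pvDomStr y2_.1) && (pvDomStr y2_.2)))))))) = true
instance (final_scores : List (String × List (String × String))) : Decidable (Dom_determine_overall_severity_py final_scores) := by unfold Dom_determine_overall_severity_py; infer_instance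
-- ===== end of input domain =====

-- B replaces A's severity-list build plus two membership scans with one running-maximum-rank pass (alternative decomposition, same cost).
-- A raises KeyError when some score dict lacks 'severity'; Pre_ excludes exactly those inputs (B raises there too).


-- ===== PORT A =====
-- score_data['severity']: first-match association-list lookup; Pre_ guarantees the key exists, so getD "" is never hit on admitted inputs
def pvSev (kv : String × List (String × String)) : String :=
  (List.lookup "severity" kv.2).getD ""

def determine_overall_severity_py (final_scores : List (String × List (String × String))) : String :=
  if final_scores = [] then "mild"
  else
    let severity_levels := final_scores.map pvSev
    if severity_levels.contains "severe" then "severe"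
    else if severity_levels.contains "moderate" then "moderate"
    else "mild"

-- ===== PORT B =====
def pvRank (s : String) : Nat :=
  if s = "severe" then 2 else if s = "moderate" then 1 else 0

def pvLabel : Nat → String
  | 2 => "severe"
  | 1 => "moderate"
  | _ => "mild"

def determine_overall_severity_py_alt (final_scores : List (String × List (String × String))) : String :=
  if final_scores = [] then "mild"
  else pvLabel (final_scores.foldl (fun r kv => max r (pvRank (pvSev kv))) 0)

-- ===== PRECONDITION & SPEC =====
-- Pre_ admits exactly the inputs on which Python A returns: every score dict must carry the 'severity' key (else A raises KeyError).
def Pre_determine_overall_severity_py (final_scores : List (String × List (String × String))) : Prop :=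
  (final_scores.all (fun kv => (List.lookup "severity" kv.2).isSome)) = true
instance (final_scores : List (String × List (String × String))) : Decidable (Pre_determine_overall_severity_py final_scores) := by unfold Pre_determine_overall_severity_py; infer_instance

def pvWitness_determine_overall_severity_py : (List (String × List (String × String))) :=
  [("anxiety", [("severity", "moderate")]), ("stress", [("severity", "severe")])]

def Spec_determine_overall_severity_py (final_scores : List (String × List (String × String))) (out : String) : Prop := out = determine_overall_severity_py_alt final_scores
instance (final_scores : List (String × List (String × String))) (out : String) : Decidable (Spec_determine_overall_severity_py final_scores out) := by unfold Spec_determine_overall_severity_py; infer_instance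

-- ===== CLAIM (what is proved, stated in full; the proofs are below) =====
def Claim_equal_determine_overall_severity_py : Prop := ∀ (final_scores : List (String × List (String × String))), Dom_determine_overall_severity_py final_scores → Pre_determine_overall_severity_py final_scores → Spec_determine_overall_severity_py final_scores (determine_overall_severity_py final_scores)

-- ===== LEMMAS AND PROOFS =====
theorem pv_foldl_max_eq_foldr (l : List String) (a : Nat) :
    l.foldl (fun r s => max r (pvRank s)) a = max a (l.foldr (fun s r => max (pvRank s) r) 0) := by
  induction l generalizing a with
  | nil => simp
  | cons s t ih => simp [List.foldl, List.foldr, ih, Nat.max_assoc]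

theorem pv_foldr_le (l : List String) : l.foldr (fun s r => max (pvRank s) r) 0 ≤ 2 := by
  induction l with
  | nil => simp
  | cons s t ih =>
    simp only [List.foldr]
    have : pvRank s ≤ 2 := by unfold pvRank; split_ifs <;> omega
    omega

theorem pv_scan_eq_label (l : List String) :
    (if l.contains "severe" then "severe"
     else if l.contains "moderate" then "moderate" else "mild")
      = pvLabel (l.foldr (fun s r => max (pvRank s) r) 0) := by
  induction l with
  | nil => simp [pvLabel]
  | cons s t ih =>
    have ht := pv_foldr_le t
    simp only [List.contains_cons, List.foldr]
    by_cases hs : s = "severe"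
    · subst hs
      have : pvRank "severe" = 2 := by decide
      rw [this]
      have h2 : max 2 (t.foldr (fun s r => max (pvRank s) r) 0) = 2 := by omega
      simp [h2, pvLabel]
    · by_cases hm : s = "moderate"
      · subst hm
        have h1 : pvRank "moderate" = 1 := by decide
        rw [h1]
        by_cases hsev : "severe" ∈ t
        · have hge : 2 ≤ t.foldr (fun s r => max (pvRank s) r) 0 := by
            clear ih ht
            induction t with
            | nil => simp at hsev
            | cons x xs ihx =>
              simp only [List.foldr]
              rcases List.mem_cons.mp hsev with h | h
              · have : pvRank x = 2 := by rw [← h]; decide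
                omega
              · have := ihx h; omega
          have hmax : max 1 (t.foldr (fun s r => max (pvRank s) r) 0)
              = t.foldr (fun s r => max (pvRank s) r) 0 := by omega
          rw [hmax, ← ih]
          simp [hsev]
        · have hne : 2 ≤ t.foldr (fun s r => max (pvRank s) r) 0 → "severe" ∈ t := by
            clear ih ht
            induction t with
            | nil => intro h; simp [List.foldr] at h
            | cons x xs ihx =>
              intro h
              simp only [List.foldr] at h
              by_cases hx2 : pvRank x = 2
              · have hx : x = "severe" := by
                  by_contra hxx
                  unfold pvRank at hx2
                  rw [if_neg hxx] at hx2
                  split_ifs at hx2 <;> omega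
                simp [hx]
              · have hxle : pvRank x ≤ 2 := by unfold pvRank; split_ifs <;> omega
                have hxs : "severe" ∈ xs := ihx (fun hh => hsev (List.mem_cons_of_mem _ hh)) (by omega)
                exact List.mem_cons_of_mem _ hxs
          have hlt : t.foldr (fun s r => max (pvRank s) r) 0 ≤ 1 := by
            by_contra hc
            exact hsev (hne (by omega))
          have hmm : max 1 (t.foldr (fun s r => max (pvRank s) r) 0) = 1 := by omega
          rw [hmm]
          have hx : ¬(("severe" : String) = "moderate") := by decide
          simp [hsev, pvLabel]
      · have h0 : pvRank s = 0 := by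
          unfold pvRank; split_ifs <;> first | exact absurd ‹_› hs | exact absurd ‹_› hm | rfl
        rw [h0]
        have : max 0 (t.foldr (fun s r => max (pvRank s) r) 0) = t.foldr (fun s r => max (pvRank s) r) 0 := by omega
        rw [this, ← ih]
        have h1 : ¬ ("severe" = s) := fun hh => hs hh.symm
        have h2 : ¬ ("moderate" = s) := fun hh => hm hh.symm
        simp [h1, h2]

theorem pv_foldl_over_map (fs : List (String × List (String × String))) (a : Nat) :
    fs.foldl (fun r kv => max r (pvRank (pvSev kv))) a
      = (fs.map pvSev).foldl (fun r s => max r (pvRank s)) a := by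
  induction fs generalizing a with
  | nil => rfl
  | cons x xs ih => simp [List.foldl, ih]

-- ===== VERDICT (by name: the statement is the Claim_ definition above) =====
theorem determine_overall_severity_py_spec : Claim_equal_determine_overall_severity_py := by
  intro fs _ _
  unfold Spec_determine_overall_severity_py determine_overall_severity_py determine_overall_severity_py_alt
  by_cases h : fs = []
  · simp [h]
  · simp only [h, if_false]
    rw [pv_foldl_over_map, pv_foldl_max_eq_foldr]
    simpa using pv_scan_eq_label (fs.map pvSev)
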